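-- pv_equiv track=rewrite | github.com/muyen/decoding-iching | scripts/yinyang_waveform_analysis.py | analyze_turning_points
-- ===== SOURCE A (Python) =====
-- def analyze_turning_points(wave):
--     """
--     分析波形的轉折點
--
--     返回轉折點位置列表（1-indexed爻位）
--     """
--     turning_points = []
--
--     for i in range(1, len(wave)-1):
--         # 局部極值
--         if wave[i] > wave[i-1] and wave[i] > wave[i+1]:
--             turning_points.append(('peak', i+1))
--         elif wave[i] < wave[i-1] and wave[i] < wave[i+1]:
--             turning_points.append(('valley', i+1))
--         # 陰陽轉換點
--         elif wave[i] != wave[i-1] and wave[i] == wave[i+1]: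
--             turning_points.append(('transition', i+1))
--
--     return turning_points
-- ===== SOURCE B (Python) =====
-- def analyze_turning_points(wave):
--     """
--     分析波形的轉折點 — run-length encode the wave into maximal runs of equal
--     values, then classify each run boundary (returns 1-indexed 爻位).
--     """
--     return _classify(_rle(wave))
--
--
-- def _rle(wave):
--     """Maximal runs of equal values: list of (value, start_index, length)."""
--     runs = []
--     i = 0
--     n = len(wave)
--     while i < n:
--         j = i + 1
--         while j < n and wave[j] == wave[i]:
--             j += 1
--         runs.append((wave[i], i, j - i))
--         i = j
--     return runs
--
--
-- def _classify(runs):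
--     out = []
--     for (pv, _, _), (v, start, length), (nv, _, _) in zip(runs, runs[1:], runs[2:]):
--         if length >= 2:
--             out.append(('transition', start + 1))
--         elif pv < v and nv < v:
--             out.append(('peak', start + 1))
--         elif pv > v and nv > v:
--             out.append(('valley', start + 1))
--     # the last run can only contribute a transition (its first index, if any
--     # index follows it inside the wave, sees an equal right neighbour)
--     if len(runs) >= 2 and runs[-1][2] >= 2:
--         out.append(('transition', runs[-1][1] + 1))
--     return out
-- ===== Notes on version B (the rewrite author's own statement) =====
-- stated objective: alternative
-- what changed: B run-length encodes the wave into maximal runs of equal values and classifies run boundaries (a zip over consecutive run triples plus a last-run check), instead of A's per-index three-way neighbour comparisons.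
import Mathlib
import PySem

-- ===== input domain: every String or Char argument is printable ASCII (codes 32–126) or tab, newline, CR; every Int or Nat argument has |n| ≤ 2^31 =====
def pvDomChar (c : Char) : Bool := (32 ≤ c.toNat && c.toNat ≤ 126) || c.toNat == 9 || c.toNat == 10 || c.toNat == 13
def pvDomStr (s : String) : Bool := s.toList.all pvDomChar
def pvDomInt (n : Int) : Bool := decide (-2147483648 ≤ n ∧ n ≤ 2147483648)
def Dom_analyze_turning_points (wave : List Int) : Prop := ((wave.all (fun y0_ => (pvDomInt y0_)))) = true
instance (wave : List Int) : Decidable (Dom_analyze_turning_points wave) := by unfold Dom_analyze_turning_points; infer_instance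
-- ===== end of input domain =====

-- B run-length encodes the wave into maximal runs of equal values and classifies run
-- boundaries, instead of A's per-index neighbour comparisons (alternative decomposition, same cost).

-- ===== PORT A =====
def analyze_turning_points (wave : List Int) : List (String × Int) :=
  (PySem.List.pyRange 1 ((wave.length : Int) - 1) 1).foldl (fun acc i =>
    if PySem.List.pyGetD wave i 0 > PySem.List.pyGetD wave (i - 1) 0 ∧
       PySem.List.pyGetD wave i 0 > PySem.List.pyGetD wave (i + 1) 0 then
      acc ++ [("peak", i + 1)]
    else if PySem.List.pyGetD wave i 0 < PySem.List.pyGetD wave (i - 1) 0 ∧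
            PySem.List.pyGetD wave i 0 < PySem.List.pyGetD wave (i + 1) 0 then
      acc ++ [("valley", i + 1)]
    else if PySem.List.pyGetD wave i 0 ≠ PySem.List.pyGetD wave (i - 1) 0 ∧
            PySem.List.pyGetD wave i 0 = PySem.List.pyGetD wave (i + 1) 0 then
      acc ++ [("transition", i + 1)]
    else acc) []

-- ===== PORT B =====
-- inner 'while j < n and wave[j] == wave[i]' of _rle
def pvRunEnd (wave : List Int) (v : Int) (j : Nat) : Nat :=
  if h : j < wave.length ∧ wave.getD j 0 = v then pvRunEnd wave v (j + 1) else j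
termination_by wave.length - j
decreasing_by omega

-- cited by pvRleAux's decreasing_by
lemma pvRunEnd_ge (wave : List Int) (v : Int) (j : Nat) : j ≤ pvRunEnd wave v j := by
  fun_induction pvRunEnd with
  | case1 j h ih => omega
  | case2 j h => omega

-- outer 'while i < n' of _rle
def pvRleAux (wave : List Int) (i : Nat) : List (Int × Int × Int) :=
  if h : i < wave.length then
    ((wave.getD i 0, (i : Int), (pvRunEnd wave (wave.getD i 0) (i + 1) : Int) - (i : Int)) ::
      pvRleAux wave (pvRunEnd wave (wave.getD i 0) (i + 1)))
  else []
termination_by wave.length - i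
decreasing_by
  have := pvRunEnd_ge wave (wave.getD i 0) (i + 1)
  have := PySem.List.len_eq wave  -- no-op anchor; length bound below
  omega

def pvRle (wave : List Int) : List (Int × Int × Int) := pvRleAux wave 0

def analyze_turning_points_alt (wave : List Int) : List (String × Int) :=
  let runs := pvRle wave
  let out := ((runs.zip runs.tail).zip runs.tail.tail).foldl (fun out t =>
    if t.1.2.2.2 ≥ 2 then out ++ [("transition", t.1.2.2.1 + 1)]
    else if t.1.1.1 < t.1.2.1 ∧ t.2.1 < t.1.2.1 then out ++ [("peak", t.1.2.2.1 + 1)]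
    else if t.1.1.1 > t.1.2.1 ∧ t.2.1 > t.1.2.1 then out ++ [("valley", t.1.2.2.1 + 1)]
    else out) ([] : List (String × Int))
  if runs.length ≥ 2 ∧ (PySem.List.pyGetD runs (-1) (0, 0, 0)).2.2 ≥ 2 then
    out ++ [("transition", (PySem.List.pyGetD runs (-1) (0, 0, 0)).2.1 + 1)]
  else out

-- ===== PRECONDITION & SPEC =====
def Spec_analyze_turning_points (wave : List Int) (out : List (String × Int)) : Prop := out = analyze_turning_points_alt wave
instance (wave : List Int) (out : List (String × Int)) : Decidable (Spec_analyze_turning_points wave out) := by unfold Spec_analyze_turning_points; infer_instance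

-- ===== CLAIM (what is proved, stated in full; the proofs are below) =====
def Claim_equal_analyze_turning_points : Prop := ∀ (wave : List Int), Dom_analyze_turning_points wave → Spec_analyze_turning_points wave (analyze_turning_points wave)

-- ===== LEMMAS AND PROOFS =====

lemma pvRunEnd_le (wave : List Int) (v : Int) (j : Nat) (hj : j ≤ wave.length) :
    pvRunEnd wave v j ≤ wave.length := by
  fun_induction pvRunEnd with
  | case1 j h ih => exact ih (by omega)
  | case2 j h => omega

lemma pvRunEnd_const (wave : List Int) (v : Int) (j : Nat) :
    ∀ k : Nat, j ≤ k → k < pvRunEnd wave v j → wave.getD k 0 = v := by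
  fun_induction pvRunEnd with
  | case1 j h ih =>
    intro k hk1 hk2
    rcases Nat.eq_or_lt_of_le hk1 with rfl | h'
    · exact h.2
    · exact ih k h' hk2
  | case2 j h => intro k hk1 hk2; omega

lemma pvRunEnd_stop (wave : List Int) (v : Int) (j : Nat)
    (h : pvRunEnd wave v j < wave.length) : wave.getD (pvRunEnd wave v j) 0 ≠ v := by
  fun_induction pvRunEnd with
  | case1 j hc ih => exact ih h
  | case2 j hc => intro hv; exact hc ⟨h, hv⟩

-- A's per-index event
def eventA (wave : List Int) (i : Int) : List (String × Int) :=
  if PySem.List.pyGetD wave i 0 > PySem.List.pyGetD wave (i - 1) 0 ∧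
     PySem.List.pyGetD wave i 0 > PySem.List.pyGetD wave (i + 1) 0 then [("peak", i + 1)]
  else if PySem.List.pyGetD wave i 0 < PySem.List.pyGetD wave (i - 1) 0 ∧
          PySem.List.pyGetD wave i 0 < PySem.List.pyGetD wave (i + 1) 0 then [("valley", i + 1)]
  else if PySem.List.pyGetD wave i 0 ≠ PySem.List.pyGetD wave (i - 1) 0 ∧
          PySem.List.pyGetD wave i 0 = PySem.List.pyGetD wave (i + 1) 0 then [("transition", i + 1)]
  else []

-- B's per-triple event
def eventB (t : ((Int × Int × Int) × (Int × Int × Int)) × (Int × Int × Int)) : List (String × Int) :=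
  if t.1.2.2.2 ≥ 2 then [("transition", t.1.2.2.1 + 1)]
  else if t.1.1.1 < t.1.2.1 ∧ t.2.1 < t.1.2.1 then [("peak", t.1.2.2.1 + 1)]
  else if t.1.1.1 > t.1.2.1 ∧ t.2.1 > t.1.2.1 then [("valley", t.1.2.2.1 + 1)]
  else []

-- the reference classification over a run chain, carrying the previous run's value
def classifySpec (prev : Option Int) : List (Int × Int × Int) → List (String × Int)
  | [] => []
  | (v, s, l) :: rest =>
    (match prev with
     | none => []
     | some p =>
       if l ≥ 2 then [("transition", s + 1)]
       else match rest with
            | (nv, _, _) :: _ =>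
              if p < v ∧ nv < v then [("peak", s + 1)]
              else if p > v ∧ nv > v then [("valley", s + 1)]
              else []
            | [] => []) ++ classifySpec (some v) rest

lemma A_flat (wave : List Int) :
    analyze_turning_points wave
      = (PySem.List.pyRange 1 ((wave.length : Int) - 1) 1).flatMap (eventA wave) := by
  unfold analyze_turning_points
  rw [show (fun (acc : List (String × Int)) (i : Int) =>
      if PySem.List.pyGetD wave i 0 > PySem.List.pyGetD wave (i - 1) 0 ∧
         PySem.List.pyGetD wave i 0 > PySem.List.pyGetD wave (i + 1) 0 then
        acc ++ [("peak", i + 1)]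
      else if PySem.List.pyGetD wave i 0 < PySem.List.pyGetD wave (i - 1) 0 ∧
              PySem.List.pyGetD wave i 0 < PySem.List.pyGetD wave (i + 1) 0 then
        acc ++ [("valley", i + 1)]
      else if PySem.List.pyGetD wave i 0 ≠ PySem.List.pyGetD wave (i - 1) 0 ∧
              PySem.List.pyGetD wave i 0 = PySem.List.pyGetD wave (i + 1) 0 then
        acc ++ [("transition", i + 1)]
      else acc)
      = fun acc i => acc ++ eventA wave i from
    funext fun acc => funext fun i => by unfold eventA; split_ifs <;> simp]
  exact PySem.List.foldl_append_eq_flatMap _ _ _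

-- patch appended for the last run
def pvPatch (rs : List (Int × Int × Int)) : List (String × Int) :=
  match rs.getLast? with
  | none => []
  | some r => if r.2.2 ≥ 2 then [("transition", r.2.1 + 1)] else []

lemma classify_zip (rs : List (Int × Int × Int)) (p : Int × Int × Int) :
    (((p :: rs).zip rs).zip rs.tail).flatMap eventB ++ pvPatch rs
      = classifySpec (some p.1) rs := by
  induction rs generalizing p with
  | nil => simp [pvPatch, classifySpec]
  | cons r rest ih =>
    cases rest with
    | nil =>
      simp only [List.zip_cons_cons, List.tail_cons, List.zip_nil_right,
        List.flatMap_nil, List.nil_append, pvPatch, List.getLast?_singleton]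
      obtain ⟨v, s, l⟩ := r
      simp only [classifySpec]
      split_ifs <;> simp
    | cons r2 t =>
      obtain ⟨v, s, l⟩ := r
      obtain ⟨nv, s2, l2⟩ := r2
      have hpatch : pvPatch ((v, s, l) :: (nv, s2, l2) :: t) = pvPatch ((nv, s2, l2) :: t) := by
        simp [pvPatch, List.getLast?_cons_cons]
      simp only [List.zip_cons_cons, List.tail_cons, List.flatMap_cons, List.append_assoc, hpatch]
      simp only [List.zip_cons_cons, List.tail_cons] at ih
      rw [ih ⟨v, s, l⟩]
      simp only [classifySpec, eventB]

lemma B_eq_classify (wave : List Int) :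
    analyze_turning_points_alt wave = classifySpec none (pvRle wave) := by
  unfold analyze_turning_points_alt
  rw [show (fun (out : List (String × Int)) (t : ((Int × Int × Int) × (Int × Int × Int)) × (Int × Int × Int)) =>
      if t.1.2.2.2 ≥ 2 then out ++ [("transition", t.1.2.2.1 + 1)]
      else if t.1.1.1 < t.1.2.1 ∧ t.2.1 < t.1.2.1 then out ++ [("peak", t.1.2.2.1 + 1)]
      else if t.1.1.1 > t.1.2.1 ∧ t.2.1 > t.1.2.1 then out ++ [("valley", t.1.2.2.1 + 1)]
      else out) = fun out t => out ++ eventB t from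
    funext fun out => funext fun t => by unfold eventB; split_ifs <;> simp]
  dsimp only
  rw [PySem.List.foldl_append_eq_flatMap]
  cases hr : pvRle wave with
  | nil => simp [classifySpec]
  | cons p rs =>
    cases rs with
    | nil => simp [classifySpec]
    | cons r rest =>
      have hne : (r :: rest : List (Int × Int × Int)) ≠ [] := by simp
      have hne2 : (p :: r :: rest : List (Int × Int × Int)) ≠ [] := by simp
      rw [PySem.List.pyGetD_neg_one (h := hne2)]
      rw [show (p :: r :: rest).getLast hne2 = (r :: rest).getLast hne from List.getLast_cons hne]
      rw [show classifySpec none (p :: r :: rest) = classifySpec (some p.1) (r :: rest) by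
        simp [classifySpec]]
      rw [← classify_zip (r :: rest) p]
      have hpatch : pvPatch (r :: rest)
          = if ((r :: rest).getLast hne).2.2 ≥ 2 then
              [("transition", ((r :: rest).getLast hne).2.1 + 1)] else [] := by
        simp [pvPatch, List.getLast?_eq_some_getLast]
      rw [hpatch]
      have hlen : ((p :: r :: rest : List (Int × Int × Int)).length ≥ 2) := by
        simp
      simp only [List.tail_cons, List.nil_append]
      split_ifs with h1 h2 <;> simp_all

lemma pvRleAux_pos (wave : List Int) (i : Nat) (h : i < wave.length) :
    pvRleAux wave i
      = (wave.getD i 0, (i : Int), ((pvRunEnd wave (wave.getD i 0) (i + 1) : Nat) : Int) - (i : Int)) ::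
        pvRleAux wave (pvRunEnd wave (wave.getD i 0) (i + 1)) := by
  rw [pvRleAux.eq_def]
  simp [h]

lemma pvRleAux_nil (wave : List Int) (i : Nat) (h : ¬ i < wave.length) :
    pvRleAux wave i = [] := by
  rw [pvRleAux.eq_def]
  simp [h]

lemma eventA_natCast (wave : List Int) (i : Nat) (h1 : 1 ≤ i) :
    eventA wave (i : Int)
      = (if wave.getD i 0 > wave.getD (i - 1) 0 ∧ wave.getD i 0 > wave.getD (i + 1) 0 then
           [("peak", (i : Int) + 1)]
         else if wave.getD i 0 < wave.getD (i - 1) 0 ∧ wave.getD i 0 < wave.getD (i + 1) 0 then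
           [("valley", (i : Int) + 1)]
         else if wave.getD i 0 ≠ wave.getD (i - 1) 0 ∧ wave.getD i 0 = wave.getD (i + 1) 0 then
           [("transition", (i : Int) + 1)]
         else []) := by
  unfold eventA
  rw [show (i : Int) - 1 = ((i - 1 : Nat) : Int) by omega,
      show (i : Int) + 1 = ((i + 1 : Nat) : Int) by omega]
  simp only [PySem.List.pyGetD_natCast]

lemma eventA_run_nil (wave : List Int) (k : Nat) (h1 : 1 ≤ k)
    (h : wave.getD k 0 = wave.getD (k - 1) 0) : eventA wave (k : Int) = [] := by
  rw [eventA_natCast wave k h1]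
  split_ifs <;> first | rfl | omega

lemma classifySpec_cons_cons (p v s l nv s2 l2 : Int) (t : List (Int × Int × Int)) :
    classifySpec (some p) ((v, s, l) :: (nv, s2, l2) :: t)
      = (if l ≥ 2 then [("transition", s + 1)]
         else if p < v ∧ nv < v then [("peak", s + 1)]
         else if p > v ∧ nv > v then [("valley", s + 1)]
         else []) ++ classifySpec (some v) ((nv, s2, l2) :: t) := rfl

lemma classifySpec_single (p v s l : Int) :
    classifySpec (some p) [(v, s, l)] = if l ≥ 2 then [("transition", s + 1)] else [] := by
  simp [classifySpec]

lemma chainA (wave : List Int) (i : Nat) (hi1 : 1 ≤ i) (hi2 : i ≤ wave.length)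
    (hb : i < wave.length → wave.getD (i - 1) 0 ≠ wave.getD i 0) :
    (PySem.List.pyRange (i : Int) ((wave.length : Int) - 1) 1).flatMap (eventA wave)
      = classifySpec (some (wave.getD (i - 1) 0)) (pvRleAux wave i) := by
  by_cases h : i < wave.length
  case neg =>
    rw [pvRleAux_nil wave i h, PySem.List.pyRange_one_eq_nil (by omega)]
    rfl
  case pos =>
  have hpv : wave.getD (i - 1) 0 ≠ wave.getD i 0 := hb h
  obtain ⟨j, hj⟩ : ∃ j, pvRunEnd wave (wave.getD i 0) (i + 1) = j := ⟨_, rfl⟩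
  have hj1 : i + 1 ≤ j := hj ▸ pvRunEnd_ge wave _ (i + 1)
  have hj2 : j ≤ wave.length := hj ▸ pvRunEnd_le wave _ (i + 1) (by omega)
  have hrun : ∀ k : Nat, i ≤ k → k < j → wave.getD k 0 = wave.getD i 0 := by
    intro k hk1 hk2
    rcases Nat.eq_or_lt_of_le hk1 with rfl | h'
    · rfl
    · exact pvRunEnd_const wave _ (i + 1) k h' (hj ▸ hk2)
  have hinterior : ∀ b : Nat, b ≤ j →
      (PySem.List.pyRange ((i : Int) + 1) (b : Int) 1).flatMap (eventA wave) = [] := by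
    intro b hbj
    rw [List.flatMap_eq_nil_iff]
    intro x hx
    rw [PySem.List.mem_pyRange_one] at hx
    obtain ⟨k, rfl⟩ : ∃ k : Nat, x = (k : Int) := ⟨x.toNat, by omega⟩
    exact eventA_run_nil wave k (by omega)
      ((hrun k (by omega) (by omega)).trans (hrun (k - 1) (by omega) (by omega)).symm)
  rw [pvRleAux_pos wave i h, hj]
  by_cases hjn : j < wave.length
  case pos =>
    -- the run ends strictly inside the wave; split the index range at j
    have hjv : wave.getD (j - 1) 0 = wave.getD i 0 := hrun (j - 1) (by omega) (by omega)
    have hstop : wave.getD j 0 ≠ wave.getD i 0 := hj ▸ pvRunEnd_stop wave _ (i + 1) (hj ▸ hjn)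
    rw [PySem.List.pyRange_one_append (i : Int) (j : Int) ((wave.length : Int) - 1)
          (by omega) (by omega),
        List.flatMap_append,
        chainA wave j (by omega) (by omega) (fun _ => by rw [hjv]; exact hstop.symm),
        hjv,
        PySem.List.pyRange_one_cons (show (i : Int) < (j : Int) by omega), List.flatMap_cons,
        hinterior j le_rfl, List.append_nil,
        pvRleAux_pos wave j hjn, classifySpec_cons_cons]
    congr 1
    rw [eventA_natCast wave i hi1]
    by_cases hl : i + 2 ≤ j
    case pos =>
      have hnext : wave.getD (i + 1) 0 = wave.getD i 0 := hrun (i + 1) (by omega) (by omega)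
      rw [hnext]
      split_ifs <;> first | rfl | omega
    case neg =>
      have hnext : wave.getD (i + 1) 0 = wave.getD j 0 := by rw [show j = i + 1 by omega]
      rw [hnext]
      split_ifs <;> first | rfl | omega
  case neg =>
    -- the run reaches the end of the wave
    rw [pvRleAux_nil wave j (by omega), classifySpec_single]
    by_cases hl : i + 2 ≤ j
    case pos =>
      have hnext : wave.getD (i + 1) 0 = wave.getD i 0 := hrun (i + 1) (by omega) (by omega)
      rw [PySem.List.pyRange_one_cons (show (i : Int) < (wave.length : Int) - 1 by omega),
          List.flatMap_cons,
          show ((wave.length : Int) - 1) = ((j - 1 : Nat) : Int) by omega,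
          hinterior (j - 1) (by omega), List.append_nil,
          eventA_natCast wave i hi1, hnext]
      split_ifs <;> first | rfl | omega
    case neg =>
      -- single trailing element: its index is outside range(1, n-1)
      rw [PySem.List.pyRange_one_eq_nil (by omega)]
      rw [if_neg (by omega)]
      rfl
termination_by wave.length - i
decreasing_by omega

lemma A_eq_classify (wave : List Int) :
    analyze_turning_points wave = classifySpec none (pvRle wave) := by
  rw [A_flat]
  unfold pvRle
  by_cases h : 0 < wave.length
  case neg =>
    rw [pvRleAux_nil wave 0 (by omega), PySem.List.pyRange_one_eq_nil (by omega)]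
    rfl
  case pos =>
  obtain ⟨j, hj⟩ : ∃ j, pvRunEnd wave (wave.getD 0 0) 1 = j := ⟨_, rfl⟩
  have hj1 : 1 ≤ j := hj ▸ pvRunEnd_ge wave _ 1
  have hj2 : j ≤ wave.length := hj ▸ pvRunEnd_le wave _ 1 (by omega)
  have hrun : ∀ k : Nat, k < j → wave.getD k 0 = wave.getD 0 0 := by
    intro k hk
    rcases Nat.eq_zero_or_pos k with rfl | h'
    · rfl
    · exact pvRunEnd_const wave _ 1 k h' (hj ▸ hk)
  have hinterior : ∀ b : Nat, b ≤ j →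
      (PySem.List.pyRange (1 : Int) (b : Int) 1).flatMap (eventA wave) = [] := by
    intro b hbj
    rw [List.flatMap_eq_nil_iff]
    intro x hx
    rw [PySem.List.mem_pyRange_one] at hx
    obtain ⟨k, rfl⟩ : ∃ k : Nat, x = (k : Int) := ⟨x.toNat, by omega⟩
    exact eventA_run_nil wave k (by omega)
      ((hrun k (by omega)).trans (hrun (k - 1) (by omega)).symm)
  rw [pvRleAux_pos wave 0 h, hj]
  rw [show classifySpec none
        ((wave.getD 0 0, ((0 : Nat) : Int), (j : Int) - ((0 : Nat) : Int)) :: pvRleAux wave j)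
      = classifySpec (some (wave.getD 0 0)) (pvRleAux wave j) by simp [classifySpec]]
  by_cases hjn : j < wave.length
  case pos =>
    have hjv : wave.getD (j - 1) 0 = wave.getD 0 0 := hrun (j - 1) (by omega)
    have hstop : wave.getD j 0 ≠ wave.getD 0 0 := hj ▸ pvRunEnd_stop wave _ 1 (hj ▸ hjn)
    rw [PySem.List.pyRange_one_append (1 : Int) (j : Int) ((wave.length : Int) - 1)
          (by omega) (by omega),
        List.flatMap_append,
        hinterior j le_rfl, List.nil_append,
        chainA wave j (by omega) (by omega) (fun _ => by rw [hjv]; exact hstop.symm),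
        hjv]
  case neg =>
    rw [pvRleAux_nil wave j (by omega),
        show ((wave.length : Int) - 1) = ((wave.length - 1 : Nat) : Int) by omega,
        hinterior (wave.length - 1) (by omega)]
    rfl

-- ===== VERDICT (by name: the statement is the Claim_ definition above) =====
theorem analyze_turning_points_spec : Claim_equal_analyze_turning_points := by
  intro wave _
  unfold Spec_analyze_turning_points
  rw [A_eq_classify, B_eq_classify]
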